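-- pv_equiv track=rewrite | github.com/anilbharadia/vedicscriptures.bhagavad-gita | src/add-speaker.py | insert_speaker
-- ===== SOURCE A (Python) =====
-- from collections import OrderedDict
--
-- def insert_speaker(data: OrderedDict, speaker: str) -> OrderedDict:
--     new_data = OrderedDict()
--     for k, v in data.items():
--         if k == 'speaker':
--             continue  # drop old, will reinsert
--         if k == 'slok':
--             new_data['speaker'] = speaker
--         new_data[k] = v
--     return new_data
-- ===== SOURCE B (Python) =====
-- from collections import OrderedDict
--
-- def insert_speaker(data: OrderedDict, speaker: str) -> OrderedDict:
--     items = [(k, v) for k, v in data.items() if k != 'speaker']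
--     keys = [k for k, _ in items]
--     if 'slok' in keys:
--         items.insert(keys.index('slok'), ('speaker', speaker))
--     return OrderedDict(items)
-- ===== Notes on version B (the rewrite author's own statement) =====
-- stated objective: alternative
-- what changed: Instead of rebuilding the dict key-by-key inside one loop with an inline conditional insertion, B first materialises the pairs without any 'speaker' key, then locates the index of 'slok' and list-inserts ('speaker', speaker) there (skipping the insert when 'slok' is absent, matching A's drop behaviour), and finally constructs the OrderedDict from the finished list.
import Mathlib
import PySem

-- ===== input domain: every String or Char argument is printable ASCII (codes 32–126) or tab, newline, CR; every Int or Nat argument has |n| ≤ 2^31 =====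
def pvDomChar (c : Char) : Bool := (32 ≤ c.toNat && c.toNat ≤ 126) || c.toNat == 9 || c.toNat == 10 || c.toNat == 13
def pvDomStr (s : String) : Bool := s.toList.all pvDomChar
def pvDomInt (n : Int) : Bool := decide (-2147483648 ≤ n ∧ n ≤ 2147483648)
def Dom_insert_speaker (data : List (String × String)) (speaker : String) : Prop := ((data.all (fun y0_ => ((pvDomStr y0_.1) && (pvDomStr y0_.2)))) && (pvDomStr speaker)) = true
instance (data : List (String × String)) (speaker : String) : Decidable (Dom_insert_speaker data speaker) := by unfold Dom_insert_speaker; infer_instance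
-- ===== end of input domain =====

-- B replaces A's single-pass dict rebuild (conditional insertion inside the loop) with a
-- filter + index-based list insert and a final dict construction (objective: alternative
-- decomposition, same cost).


-- ===== PORT A =====
-- A's loop: skip any existing 'speaker' pair; right before writing 'slok', write 'speaker'.
def insert_speaker (data : List (String × String)) (speaker : String) : List (String × String) :=
  (data.foldl
    (fun new_data kv =>
      if kv.1 == "speaker" then new_data
      else
        let new_data := if kv.1 == "slok" then new_data.insert "speaker" speaker else new_data
        new_data.insert kv.1 kv.2)
    (PySem.Dict.empty : PySem.Dict String String)).items

-- ===== PORT B =====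
-- B: filter out 'speaker', list-insert ('speaker', speaker) at the index of 'slok' (if any),
-- then construct the dict from the finished list.
def insert_speaker_alt (data : List (String × String)) (speaker : String) : List (String × String) :=
  let items := data.filter (fun kv => !(kv.1 == "speaker"))
  let keys := items.map (fun kv => kv.1)
  let items :=
    if keys.contains "slok" then
      match PySem.List.index? keys "slok" with
      | some i => PySem.List.insert items (i : Int) ("speaker", speaker)
      | none => items
    else items
  (PySem.Dict.ofList items).items

-- ===== PRECONDITION & SPEC =====
def Spec_insert_speaker (data : List (String × String)) (speaker : String) (out : List (String × String)) : Prop := out = insert_speaker_alt data speaker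
instance (data : List (String × String)) (speaker : String) (out : List (String × String)) : Decidable (Spec_insert_speaker data speaker out) := by unfold Spec_insert_speaker; infer_instance

-- ===== CLAIM (what is proved, stated in full; the proofs are below) =====
def Claim_equal_insert_speaker : Prop := ∀ (data : List (String × String)) (speaker : String), Dom_insert_speaker data speaker → Spec_insert_speaker data speaker (insert_speaker data speaker)

-- ===== LEMMAS AND PROOFS =====

-- A's loop step, named for the proofs.
def stepA (speaker : String) (new_data : PySem.Dict String String) (kv : String × String) : PySem.Dict String String :=
  if kv.1 == "speaker" then new_data
  else
    let new_data := if kv.1 == "slok" then new_data.insert "speaker" speaker else new_data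
    new_data.insert kv.1 kv.2

-- The list B feeds to OrderedDict, described structurally.
def bL (speaker : String) : List (String × String) → List (String × String)
  | [] => []
  | (k, v) :: t =>
    if k == "speaker" then bL speaker t
    else if k == "slok" then ("speaker", speaker) :: (k, v) :: (t.filter (fun kv => !(kv.1 == "speaker")))
    else (k, v) :: bL speaker t

theorem stepA_speaker (speaker v : String) (d : PySem.Dict String String) :
    stepA speaker d ("speaker", v) = d := by simp [stepA]

theorem stepA_slok (speaker v : String) (d : PySem.Dict String String) :
    stepA speaker d ("slok", v) = (d.insert "speaker" speaker).insert "slok" v := by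
  simp [stepA]

theorem stepA_other (speaker : String) {k : String} (v : String) (d : PySem.Dict String String)
    (hk : k ≠ "speaker") (hsl : k ≠ "slok") : stepA speaker d (k, v) = d.insert k v := by
  simp [stepA, hk, hsl]

-- Re-inserting a binding a dict already holds is a no-op.
theorem insert_of_get?_eq_some {d : PySem.Dict String String} {k : String} {v : String}
    (hnd : d.keys.Nodup) (h : d.get? k = some v) : d.insert k v = d := by
  apply PySem.Dict.ext
  rw [PySem.Dict.items_insert_of_contains d v (by rw [PySem.Dict.contains_eq_isSome_get?, h]; rfl)]
  have hmap : ∀ p ∈ d.items, (if (p.1 == k) = true then (k, v) else p) = p := by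
    intro p hp
    by_cases hk : p.1 = k
    · obtain ⟨p1, p2⟩ := p
      simp only at hk; subst hk
      have := PySem.Dict.get?_of_mem_items d hp hnd
      rw [h] at this
      simp_all
    · simp [hk]
  rw [List.map_congr_left hmap]
  simp

-- After 'speaker' has been written, A's loop is a plain insert-fold over the non-'speaker' pairs.
theorem phase2 (speaker : String) (l : List (String × String)) :
    ∀ d : PySem.Dict String String, d.keys.Nodup → d.get? "speaker" = some speaker →
    l.foldl (stepA speaker) d
      = (l.filter (fun kv => !(kv.1 == "speaker"))).foldl (fun d kv => d.insert kv.1 kv.2) d := by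
  induction l with
  | nil => intro d _ _; rfl
  | cons kv t ih =>
    intro d hnd hs
    obtain ⟨k, v⟩ := kv
    rw [List.foldl_cons]
    by_cases hk : k = "speaker"
    · subst hk
      rw [stepA_speaker,
        show ((("speaker", v) :: t).filter (fun kv => !(kv.1 == "speaker")))
          = t.filter (fun kv => !(kv.1 == "speaker")) by simp]
      exact ih d hnd hs
    · by_cases hsl : k = "slok"
      · subst hsl
        rw [stepA_slok, insert_of_get?_eq_some hnd hs,
          show ((("slok", v) :: t).filter (fun kv => !(kv.1 == "speaker")))
            = ("slok", v) :: t.filter (fun kv => !(kv.1 == "speaker")) by simp,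
          List.foldl_cons]
        exact ih _ (PySem.Dict.nodup_keys_insert d _ _ hnd)
          (by rw [PySem.Dict.get?_insert_of_ne d _ (by decide)]; exact hs)
      · rw [stepA_other speaker v d hk hsl,
          show (((k, v) :: t).filter (fun kv => !(kv.1 == "speaker")))
            = (k, v) :: t.filter (fun kv => !(kv.1 == "speaker")) by simp [hk],
          List.foldl_cons]
        exact ih _ (PySem.Dict.nodup_keys_insert d _ _ hnd)
          (by rw [PySem.Dict.get?_insert_of_ne d _ (Ne.symm hk)]; exact hs)

-- A's whole loop computes the insert-fold of bL.
theorem phase1 (speaker : String) (l : List (String × String)) :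
    ∀ d : PySem.Dict String String, d.keys.Nodup →
    l.foldl (stepA speaker) d = (bL speaker l).foldl (fun d kv => d.insert kv.1 kv.2) d := by
  induction l with
  | nil => intro d _; rfl
  | cons kv t ih =>
    intro d hnd
    obtain ⟨k, v⟩ := kv
    rw [List.foldl_cons]
    by_cases hk : k = "speaker"
    · subst hk
      rw [stepA_speaker, show bL speaker (("speaker", v) :: t) = bL speaker t by simp [bL]]
      exact ih d hnd
    · by_cases hsl : k = "slok"
      · subst hsl
        rw [stepA_slok,
          show bL speaker (("slok", v) :: t)
            = ("speaker", speaker) :: ("slok", v) :: t.filter (fun kv => !(kv.1 == "speaker"))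
            by simp [bL],
          List.foldl_cons, List.foldl_cons]
        exact phase2 speaker t _
          (PySem.Dict.nodup_keys_insert _ _ _ (PySem.Dict.nodup_keys_insert d _ _ hnd))
          (by rw [PySem.Dict.get?_insert_of_ne _ _ (by decide)]
              exact PySem.Dict.get?_insert_self ..)
      · rw [stepA_other speaker v d hk hsl,
          show bL speaker ((k, v) :: t) = (k, v) :: bL speaker t by simp [bL, hk, hsl],
          List.foldl_cons]
        exact ih _ (PySem.Dict.nodup_keys_insert d _ _ hnd)

-- B's filter + index-insert builds exactly bL.
theorem bList_eq (speaker : String) (l : List (String × String)) :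
    (if ((l.filter (fun kv => !(kv.1 == "speaker"))).map (fun kv => kv.1)).contains "slok" then
       match PySem.List.index? ((l.filter (fun kv => !(kv.1 == "speaker"))).map (fun kv => kv.1)) "slok" with
       | some i => PySem.List.insert (l.filter (fun kv => !(kv.1 == "speaker"))) (i : Int) ("speaker", speaker)
       | none => l.filter (fun kv => !(kv.1 == "speaker"))
     else l.filter (fun kv => !(kv.1 == "speaker"))) = bL speaker l := by
  induction l with
  | nil => rfl
  | cons kv t ih =>
    obtain ⟨k, v⟩ := kv
    by_cases hk : k = "speaker"
    · subst hk
      rw [show ((("speaker", v) :: t).filter (fun kv => !(kv.1 == "speaker")))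
          = t.filter (fun kv => !(kv.1 == "speaker")) by simp,
        show bL speaker (("speaker", v) :: t) = bL speaker t by simp [bL]]
      exact ih
    · have hfil : (((k, v) :: t).filter (fun kv => !(kv.1 == "speaker")))
          = (k, v) :: t.filter (fun kv => !(kv.1 == "speaker")) := by simp [hk]
      set F := t.filter (fun kv => !(kv.1 == "speaker")) with hF
      set K := F.map (fun kv => kv.1) with hK
      by_cases hsl : k = "slok"
      · subst hsl
        rw [hfil, List.map_cons,
          if_pos (show (("slok" :: K).contains "slok") = true by simp),
          PySem.List.index?_cons_self,
          show bL speaker (("slok", v) :: t) = ("speaker", speaker) :: ("slok", v) :: F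
            by simp [bL, hF]]
        show PySem.List.insert (("slok", v) :: F) ((0 : Nat) : Int) ("speaker", speaker) = _
        rw [Nat.cast_zero, PySem.List.insert_zero]
      · rw [hfil, List.map_cons,
          show bL speaker ((k, v) :: t) = (k, v) :: bL speaker t by simp [bL, hk, hsl],
          show ((k :: K).contains "slok") = K.contains "slok" by
            simp [Ne.symm hsl],
          PySem.List.index?_cons_of_ne K hsl]
        by_cases hc : K.contains "slok"
        · rw [if_pos hc]
          rw [if_pos hc] at ih
          obtain ⟨i, hi⟩ := Option.isSome_iff_exists.mp
            ((PySem.List.index?_isSome_iff (xs := K) (v := "slok")).2 (by simpa using hc))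
          have hilt : i < F.length := by
            rcases PySem.List.getElem_of_index?_eq_some hi with ⟨h1, _⟩
            simpa [hK] using h1
          have ih' : PySem.List.insert F (i : Int) ("speaker", speaker) = bL speaker t := by
            rw [hi] at ih; exact ih
          rw [hi]
          show PySem.List.insert ((k, v) :: F) ((i + 1 : Nat) : Int) ("speaker", speaker)
              = (k, v) :: bL speaker t
          rw [PySem.List.insert_natCast _ _ _ (by simpa using Nat.succ_le_succ (le_of_lt hilt)),
            List.take_succ_cons, List.drop_succ_cons, List.cons_append]
          rw [← ih', PySem.List.insert_natCast _ _ _ (le_of_lt hilt)]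
        · rw [if_neg hc]
          rw [if_neg hc] at ih
          rw [ih]

-- ===== VERDICT (by name: the statement is the Claim_ definition above) =====
theorem insert_speaker_spec : Claim_equal_insert_speaker := by
  intro data speaker _
  show insert_speaker data speaker = insert_speaker_alt data speaker
  have hA : insert_speaker data speaker
      = (data.foldl (stepA speaker) (PySem.Dict.empty : PySem.Dict String String)).items := rfl
  have hB : insert_speaker_alt data speaker
      = (PySem.Dict.ofList (bL speaker data)).items :=
    congrArg (fun l => (PySem.Dict.ofList l).items) (bList_eq speaker data)
  rw [hA, hB, phase1 speaker data PySem.Dict.empty PySem.Dict.nodup_keys_empty]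
  rfl
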